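-- pv_equiv track=rewrite | github.com/knl-kolhe/BE-Project | OCR/Testing.py | parse_1
-- ===== SOURCE A (Python) =====
-- def parse_1(Bstr):
--     card_no=''
--     parts=Bstr.split("\n")
--     strlen=[]
--     for op in parts:
--         strlen.append(len(op))
--     card_no=parts[strlen.index(max(strlen))]
--
--     return card_no
-- ===== SOURCE B (Python) =====
-- def parse_1(Bstr):
--     parts = Bstr.split("\n")
--     best = parts[0]
--     for line in parts[1:]:
--         if len(line) > len(best):
--             best = line
--     return best
-- ===== Notes on version B (the rewrite author's own statement) =====
-- stated objective: simpler
-- what changed: Single running-best pass over the split lines instead of building an auxiliary lengths list and then doing max() plus an index() back-scan and a list lookup.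
import Mathlib
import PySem

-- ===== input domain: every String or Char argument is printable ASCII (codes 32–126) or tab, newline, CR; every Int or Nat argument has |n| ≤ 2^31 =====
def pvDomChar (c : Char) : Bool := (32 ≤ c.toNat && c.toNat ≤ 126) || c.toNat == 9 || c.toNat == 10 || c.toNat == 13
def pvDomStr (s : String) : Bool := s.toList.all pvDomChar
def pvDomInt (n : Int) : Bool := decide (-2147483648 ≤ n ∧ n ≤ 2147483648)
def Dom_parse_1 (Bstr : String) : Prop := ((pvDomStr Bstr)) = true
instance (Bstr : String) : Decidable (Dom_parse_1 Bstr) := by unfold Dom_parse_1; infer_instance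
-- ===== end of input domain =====

-- B replaces A's lengths list + max() + index() back-scan by a single running-best pass over the lines (simpler decomposition, same result).


-- ===== PORT A =====
def parse_1 (Bstr : String) : String :=
  let card_no : String := ""
  let parts := (PySem.Str.split? Bstr "\n").getD []   -- sep "\n" ≠ "", so split? is some
  let strlen := parts.foldl (fun acc op => acc ++ [PySem.Str.len op]) ([] : List Int)
  match PySem.List.max? strlen (fun x => x) with
  | none => card_no                                   -- unreachable: split result is nonempty
  | some m =>
    match PySem.List.index? strlen m with
    | none => card_no                                 -- unreachable: m ∈ strlen
    | some i => (PySem.List.pyGet? parts (i : Int)).getD card_no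

-- ===== PORT B =====
def parse_1_alt (Bstr : String) : String :=
  match (PySem.Str.split? Bstr "\n").getD [] with
  | [] => ""                                          -- unreachable: split result is nonempty
  | best0 :: rest =>
    rest.foldl (fun best line =>
      if PySem.Str.len line > PySem.Str.len best then line else best) best0

-- ===== PRECONDITION & SPEC =====
def Spec_parse_1 (Bstr : String) (out : String) : Prop := out = parse_1_alt Bstr
instance (Bstr : String) (out : String) : Decidable (Spec_parse_1 Bstr out) := by unfold Spec_parse_1; infer_instance

-- ===== CLAIM (what is proved, stated in full; the proofs are below) =====
def Claim_equal_parse_1 : Prop := ∀ (Bstr : String), Dom_parse_1 Bstr → Spec_parse_1 Bstr (parse_1 Bstr)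

-- ===== LEMMAS AND PROOFS =====

-- first-longest of b :: t, recursively from the right
def pvFM (b : String) (t : List String) : String :=
  match t with
  | [] => b
  | x :: t' =>
    let c := pvFM x t'
    if PySem.Str.len b < PySem.Str.len c then c else b

theorem pvFoldlMaxShift (l : List Int) (a b : Int) :
    l.foldl max (max a b) = max a (l.foldl max b) := by
  induction l generalizing b with
  | nil => rfl
  | cons x l ih =>
    simp only [List.foldl_cons]
    rw [max_assoc, ih]

theorem pvLenFM (t : List String) (b : String) :
    PySem.Str.len (pvFM b t) = (t.map PySem.Str.len).foldl max (PySem.Str.len b) := by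
  induction t generalizing b with
  | nil => rfl
  | cons x t' ih =>
    simp only [pvFM, List.map_cons, List.foldl_cons]
    rw [show max (PySem.Str.len b) (PySem.Str.len x) = max (PySem.Str.len b) (PySem.Str.len x) from rfl,
        pvFoldlMaxShift, ← ih x]
    split_ifs <;> omega

theorem pvFMMem (t : List String) (b : String) : pvFM b t ∈ b :: t := by
  induction t generalizing b with
  | nil => simp [pvFM]
  | cons x t' ih =>
    simp only [pvFM]
    split_ifs
    · have := ih x
      simp at this ⊢
      tauto
    · simp

theorem pvFMStep (t : List String) (b x : String) :
    pvFM (if PySem.Str.len b < PySem.Str.len x then x else b) t =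
      (if PySem.Str.len b < PySem.Str.len (pvFM x t) then pvFM x t else b) := by
  cases t with
  | nil => rfl
  | cons y t' =>
    simp only [pvFM]
    split_ifs <;> first | rfl | omega

theorem pvFoldB (t : List String) (b : String) :
    t.foldl (fun best line =>
      if PySem.Str.len line > PySem.Str.len best then line else best) b = pvFM b t := by
  induction t generalizing b with
  | nil => rfl
  | cons x t' ih =>
    simp only [List.foldl_cons, gt_iff_lt]
    rw [ih, pvFMStep]
    simp only [pvFM]

theorem pvAEq (t : List String) (h : String) :
    (match PySem.List.index? ((h :: t).map PySem.Str.len)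
        ((t.map PySem.Str.len).foldl max (PySem.Str.len h)) with
      | none => ""
      | some i => (PySem.List.pyGet? (h :: t) (i : Int)).getD "") = pvFM h t := by
  induction t generalizing h with
  | nil =>
    simp [pvFM]
  | cons x t' ih =>
    have hshift : ((x :: t').map PySem.Str.len).foldl max (PySem.Str.len h)
        = max (PySem.Str.len h) ((t'.map PySem.Str.len).foldl max (PySem.Str.len x)) := by
      simp only [List.map_cons, List.foldl_cons]
      exact pvFoldlMaxShift _ _ _
    set M' := (t'.map PySem.Str.len).foldl max (PySem.Str.len x) with hM'
    by_cases hle : M' ≤ PySem.Str.len h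
    · -- head attains the max: index is 0, result is h
      have hM : ((x :: t').map PySem.Str.len).foldl max (PySem.Str.len h) = PySem.Str.len h := by
        rw [hshift]; omega
      rw [hM]
      rw [show ((h :: x :: t').map PySem.Str.len) = PySem.Str.len h :: ((x :: t').map PySem.Str.len) from rfl,
          PySem.List.index?_cons_self]
      have : PySem.Str.len (pvFM x t') = M' := by rw [pvLenFM]
      simp only [PySem.List.pyGet?_natCast, List.getElem?_cons_zero, Option.getD_some]
      rw [show pvFM h (x :: t')
            = (if PySem.Str.len h < PySem.Str.len (pvFM x t') then pvFM x t' else h) from rfl,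
          if_neg (by omega)]
    · -- max is attained strictly later: skip the head and recurse
      have hM : ((x :: t').map PySem.Str.len).foldl max (PySem.Str.len h) = M' := by
        rw [hshift]; omega
      rw [hM]
      have hlenfm : PySem.Str.len (pvFM x t') = M' := by rw [pvLenFM]
      have hmem : M' ∈ (x :: t').map PySem.Str.len := by
        rw [← hlenfm]
        exact List.mem_map_of_mem (pvFMMem t' x)
      have hsome : (PySem.List.index? ((x :: t').map PySem.Str.len) M').isSome := by
        rw [PySem.List.index?_isSome_iff]; exact hmem
      obtain ⟨i, hi⟩ := Option.isSome_iff_exists.mp hsome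
      have hne : PySem.Str.len h ≠ M' := by omega
      rw [show ((h :: x :: t').map PySem.Str.len) = PySem.Str.len h :: ((x :: t').map PySem.Str.len) from rfl,
          PySem.List.index?_cons_of_ne _ hne, hi]
      simp only [Option.map_some]
      have hIH := ih x
      rw [← hM', hi] at hIH
      simp only [PySem.List.pyGet?_natCast] at hIH ⊢
      simp only [List.getElem?_cons_succ]
      rw [hIH,
          show pvFM h (x :: t')
            = (if PySem.Str.len h < PySem.Str.len (pvFM x t') then pvFM x t' else h) from rfl,
          if_pos (by omega)]

-- ===== VERDICT (by name: the statement is the Claim_ definition above) =====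
theorem parse_1_spec : Claim_equal_parse_1 := by
  intro Bstr _
  unfold Spec_parse_1 parse_1 parse_1_alt
  cases hp : (PySem.Str.split? Bstr "\n").getD [] with
  | nil => simp [PySem.List.max?]
  | cons h t =>
    simp only [PySem.List.foldl_append_singleton_eq_map, List.nil_append, List.map_cons,
      PySem.List.max?_id_cons]
    rw [pvFoldB]
    have h2 := pvAEq t h
    simp only [List.map_cons] at h2
    exact h2
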